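-- pv_equiv track=rewrite | github.com/aaldebarann/qtomography | qst.py | transpile_measure_operators
-- ===== SOURCE A (Python) =====
-- def transpile_measure_operators(measures, num_total, measured_idx):
--     transpiled = []
--     for item in measures:
--         obs, out = item
--         tobs = ''
--         tout = ''
--         for i in range(num_total):
--             if i in measured_idx:
--                 tobs += obs[measured_idx.index(i)]
--                 tout += out[measured_idx.index(i)]
--             else:
--                 tobs += 'Z'
--                 tout += '0'
--         transpiled.append((tobs, tout))
--     return transpiled
-- ===== SOURCE B (Python) =====
-- def transpile_measure_operators(measures, num_total, measured_idx):
--     # scatter: precompute position -> first index once, then write into a 'Z'/'0' template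
--     mapping = {}
--     for j, pos in enumerate(measured_idx):
--         if 0 <= pos < num_total and pos not in mapping:
--             mapping[pos] = j
--     transpiled = []
--     for obs, out in measures:
--         tobs = ['Z'] * num_total
--         tout = ['0'] * num_total
--         for pos, j in mapping.items():
--             tobs[pos] = obs[j]
--             tout[pos] = out[j]
--         transpiled.append((''.join(tobs), ''.join(tout)))
--     return transpiled
-- ===== Notes on version B (the rewrite author's own statement) =====
-- stated objective: faster
-- what changed: B precomputes once a dict mapping each in-range register position to its first index in measured_idx and then, per measure, scatters characters into a ['Z']/['0'] template, instead of A's per-position membership test plus repeated list.index scans inside the position loop.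
import Mathlib
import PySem

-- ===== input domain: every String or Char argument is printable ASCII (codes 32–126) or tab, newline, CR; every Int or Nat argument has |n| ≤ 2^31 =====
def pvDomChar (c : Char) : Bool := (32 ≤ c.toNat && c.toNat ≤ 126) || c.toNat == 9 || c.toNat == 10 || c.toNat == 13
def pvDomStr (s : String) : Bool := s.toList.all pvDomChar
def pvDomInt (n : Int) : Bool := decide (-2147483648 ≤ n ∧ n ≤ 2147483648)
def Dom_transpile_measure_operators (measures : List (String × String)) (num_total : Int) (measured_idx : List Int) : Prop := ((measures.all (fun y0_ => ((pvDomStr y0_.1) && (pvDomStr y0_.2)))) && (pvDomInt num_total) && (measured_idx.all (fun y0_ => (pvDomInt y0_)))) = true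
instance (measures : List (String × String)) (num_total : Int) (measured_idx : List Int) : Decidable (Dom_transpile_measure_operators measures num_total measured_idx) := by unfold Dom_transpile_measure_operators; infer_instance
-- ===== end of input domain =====

-- B replaces A's per-position membership test and repeated list.index scans by one precomputed
-- position→first-index dict and a scatter into a 'Z'/'0' template (objective: faster).

-- ===== PORT A =====
-- one iteration of A's inner `for i in range(num_total)` loop
def pvAStep (measured_idx : List Int) (obs out : String) (st : List Char × List Char) (i : Int) : List Char × List Char :=
  if measured_idx.contains i then
    (st.1 ++ [(PySem.Str.pyGet? obs (((PySem.List.index? measured_idx i).getD 0 : Nat) : Int)).getD '?'],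
     st.2 ++ [(PySem.Str.pyGet? out (((PySem.List.index? measured_idx i).getD 0 : Nat) : Int)).getD '?'])
  else
    (st.1 ++ ['Z'], st.2 ++ ['0'])

-- body of A's outer `for item in measures` loop: build tobs/tout for one measure
def pvAMeasure (num_total : Int) (measured_idx : List Int) (item : String × String) : String × String :=
  let st := (PySem.List.pyRange 0 num_total 1).foldl (pvAStep measured_idx item.1 item.2) ([], [])
  (String.ofList st.1, String.ofList st.2)

def transpile_measure_operators (measures : List (String × String)) (num_total : Int) (measured_idx : List Int) : List (String × String) :=
  measures.foldl (fun transpiled item => transpiled ++ [pvAMeasure num_total measured_idx item]) []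

-- ===== PORT B =====
-- the dict `mapping`: in-range position -> first index in measured_idx holding it
def pvFirstMap (num_total : Int) (measured_idx : List Int) : PySem.Dict Int Int :=
  (PySem.List.enumerate measured_idx).foldl (fun d p =>
    if 0 ≤ p.2 ∧ p.2 < num_total ∧ d.contains p.2 = false then d.insert p.2 p.1 else d)
    PySem.Dict.empty

-- B's per-measure body: scatter obs/out characters into the 'Z'/'0' templates
def pvBMeasure (mapping : PySem.Dict Int Int) (num_total : Int) (item : String × String) : String × String :=
  let st := mapping.items.foldl (fun (st : List Char × List Char) q =>
      (st.1.set q.1.toNat ((PySem.Str.pyGet? item.1 q.2).getD '?'),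
       st.2.set q.1.toNat ((PySem.Str.pyGet? item.2 q.2).getD '?')))
      (List.replicate num_total.toNat 'Z', List.replicate num_total.toNat '0')
  (String.ofList st.1, String.ofList st.2)

def transpile_measure_operators_alt (measures : List (String × String)) (num_total : Int) (measured_idx : List Int) : List (String × String) :=
  let mapping := pvFirstMap num_total measured_idx
  measures.map (pvBMeasure mapping num_total)

-- ===== PRECONDITION & SPEC =====
-- Pre_ excludes exactly the inputs where Python A raises IndexError: some measured in-range
-- position i whose first index in measured_idx falls beyond obs or out.
def Pre_transpile_measure_operators (measures : List (String × String)) (num_total : Int) (measured_idx : List Int) : Prop :=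
  ∀ p ∈ measures, ∀ i ∈ measured_idx, 0 ≤ i → i < num_total →
    measured_idx.idxOf i < p.1.toList.length ∧ measured_idx.idxOf i < p.2.toList.length
instance (measures : List (String × String)) (num_total : Int) (measured_idx : List Int) : Decidable (Pre_transpile_measure_operators measures num_total measured_idx) := by unfold Pre_transpile_measure_operators; infer_instance

def pvWitness_transpile_measure_operators : (List (String × String)) × Int × List Int := ([("XY", "01")], 3, [2, 0])

def Spec_transpile_measure_operators (measures : List (String × String)) (num_total : Int) (measured_idx : List Int) (out : List (String × String)) : Prop := out = transpile_measure_operators_alt measures num_total measured_idx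
instance (measures : List (String × String)) (num_total : Int) (measured_idx : List Int) (out : List (String × String)) : Decidable (Spec_transpile_measure_operators measures num_total measured_idx out) := by unfold Spec_transpile_measure_operators; infer_instance

-- ===== CLAIM (what is proved, stated in full; the proofs are below) =====
def Claim_equal_transpile_measure_operators : Prop := ∀ (measures : List (String × String)) (num_total : Int) (measured_idx : List Int), Dom_transpile_measure_operators measures num_total measured_idx → Pre_transpile_measure_operators measures num_total measured_idx → Spec_transpile_measure_operators measures num_total measured_idx (transpile_measure_operators measures num_total measured_idx)

-- ===== LEMMAS AND PROOFS =====

-- the character A's inner loop appends at position i, for source string s with filler d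
def pvAChar (measured_idx : List Int) (s : String) (d : Char) (i : Int) : Char :=
  if measured_idx.contains i then
    (s.toList[((PySem.List.index? measured_idx i).getD 0 : Nat)]?).getD '?'
  else d

theorem pvAStep_eq (measured_idx : List Int) (obs out : String) (st : List Char × List Char) (i : Int) :
    pvAStep measured_idx obs out st i
      = (st.1 ++ [pvAChar measured_idx obs 'Z' i], st.2 ++ [pvAChar measured_idx out '0' i]) := by
  unfold pvAStep pvAChar
  split <;> simp

-- A's inner fold is the pair of gathered character maps
theorem pvAInner_eq (num_total : Int) (measured_idx : List Int) (obs out : String) :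
    (PySem.List.pyRange 0 num_total 1).foldl (pvAStep measured_idx obs out) ([], [])
      = ((PySem.List.pyRange 0 num_total 1).map (pvAChar measured_idx obs 'Z'),
         (PySem.List.pyRange 0 num_total 1).map (pvAChar measured_idx out '0')) := by
  have h : pvAStep measured_idx obs out
      = fun (st : List Char × List Char) i =>
          (st.1 ++ [pvAChar measured_idx obs 'Z' i], st.2 ++ [pvAChar measured_idx out '0' i]) :=
    funext fun st => funext fun i => pvAStep_eq measured_idx obs out st i
  rw [h, PySem.List.foldl_prod_mk (fun a i => a ++ [pvAChar measured_idx obs 'Z' i])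
        (fun a i => a ++ [pvAChar measured_idx out '0' i]),
      PySem.List.foldl_append_singleton_eq_map, PySem.List.foldl_append_singleton_eq_map]
  simp

-- scatter over distinct nonnegative keys, read back pointwise
theorem pvScatter_getElem? (f : (Int × Int) → Char) (ps : List (Int × Int)) (cs : List Char)
    (hnd : (ps.map Prod.fst).Nodup) (hpos : ∀ q ∈ ps, 0 ≤ q.1) (k : Nat) :
    (ps.foldl (fun l q => l.set q.1.toNat (f q)) cs)[k]? =
      match ps.find? (fun q => q.1 == (k : Int)) with
      | some q => if k < cs.length then some (f q) else none
      | none => cs[k]? := by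
  induction ps generalizing cs with
  | nil => simp
  | cons q rest ih =>
      have hq0 : 0 ≤ q.1 := hpos q (List.mem_cons_self)
      have hnd' : (rest.map Prod.fst).Nodup := (List.nodup_cons.mp hnd).2
      have hqn : q.1 ∉ rest.map Prod.fst := (List.nodup_cons.mp hnd).1
      simp only [List.foldl_cons, List.find?_cons]
      by_cases hqk : q.1 = (k : Int)
      · have hb : (q.1 == (k : Int)) = true := by simp [hqk]
        rw [hb]
        have hfind : rest.find? (fun p => p.1 == (k : Int)) = none := by
          apply List.find?_eq_none.mpr
          intro p hp hpk
          exact hqn (hqk ▸ (by simpa using hpk) ▸ List.mem_map_of_mem hp)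
        rw [ih _ hnd' (fun p hp => hpos p (List.mem_cons_of_mem _ hp)), hfind]
        have hkn : q.1.toNat = k := by omega
        rw [hkn]
        by_cases hlt : k < cs.length
        · simp [hlt]
        · simp [hlt]
      · have hb : (q.1 == (k : Int)) = false := by simp [hqk]
        rw [hb]
        have hne : q.1.toNat ≠ k := by omega
        rw [ih _ hnd' (fun p hp => hpos p (List.mem_cons_of_mem _ hp))]
        cases hf : rest.find? (fun p => p.1 == (k : Int)) with
        | none => simp [List.getElem?_set_ne hne]
        | some p => simp [List.length_set]

-- the build fold of pvFirstMap, characterised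
theorem pvBuild_get? (num_total : Int) (l : List (Int × Int)) (d : PySem.Dict Int Int) (i : Int) :
    (l.foldl (fun d p => if 0 ≤ p.2 ∧ p.2 < num_total ∧ d.contains p.2 = false then d.insert p.2 p.1 else d) d).get? i =
      match d.get? i with
      | some v => some v
      | none => if 0 ≤ i ∧ i < num_total then (l.find? (fun p => p.2 == i)).map Prod.fst else none := by
  induction l generalizing d with
  | nil =>
      cases hd : d.get? i <;> simp [hd]
  | cons p rest ih =>
      simp only [List.foldl_cons, List.find?_cons]
      by_cases hg : 0 ≤ p.2 ∧ p.2 < num_total ∧ d.contains p.2 = false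
      · rw [if_pos hg, ih]
        by_cases hip : i = p.2
        · subst hip
          have hdnone : d.get? p.2 = none := by
            rw [PySem.Dict.get?_eq_none_iff_contains]
            exact hg.2.2
          rw [PySem.Dict.get?_insert_self, hdnone]
          simp [hg.1, hg.2.1]
        · rw [PySem.Dict.get?_insert_of_ne d p.1 hip]
          have hb : (p.2 == i) = false := by simp; omega
          rw [hb]
      · rw [if_neg hg, ih]
        cases hd : d.get? i with
        | some v => rfl
        | none =>
            by_cases hr : 0 ≤ i ∧ i < num_total
            · have hb : (p.2 == i) = false := by
                simp only [beq_eq_false_iff_ne, ne_eq]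
                intro he
                rcases not_and_or.mp hg with h1 | h23
                · omega
                · rcases not_and_or.mp h23 with h2 | h3
                  · omega
                  · have hct : d.contains p.2 = true := by
                      cases hc : d.contains p.2
                      · exact absurd hc h3
                      · rfl
                    rw [he] at hct
                    rw [PySem.Dict.get?_eq_none_iff_contains] at hd
                    rw [hd] at hct
                    cases hct
              rw [hb]
            · simp [hr]

theorem pvBuild_nodup (num_total : Int) (l : List (Int × Int)) (d : PySem.Dict Int Int)
    (h : d.keys.Nodup) :
    ((l.foldl (fun d p => if 0 ≤ p.2 ∧ p.2 < num_total ∧ d.contains p.2 = false then d.insert p.2 p.1 else d) d).keys).Nodup := by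
  induction l generalizing d with
  | nil => exact h
  | cons p rest ih =>
      simp only [List.foldl_cons]
      split
      · exact ih _ (PySem.Dict.nodup_keys_insert _ _ _ h)
      · exact ih _ h

theorem pvFind?_enumerate (xs : List Int) (s : Int) (i : Int) :
    (PySem.List.enumerate xs s).find? (fun p => p.2 == i)
      = if i ∈ xs then some (s + (xs.idxOf i : Int), i) else none := by
  induction xs generalizing s with
  | nil => simp [PySem.List.enumerate_nil]
  | cons x rest ih =>
      rw [PySem.List.enumerate_cons, List.find?_cons]
      by_cases hx : x = i
      · subst hx
        simp [List.idxOf_cons_self]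
      · have hb : (((s, x) : Int × Int).2 == i) = false := by simp [hx]
        rw [hb, ih (s + 1)]
        by_cases hm : i ∈ rest
        · simp [hm, List.idxOf_cons_ne rest hx]
          ring
        · simp [hm]
          exact fun h => hx h.symm

theorem pvFirstMap_get? (num_total : Int) (measured_idx : List Int) (i : Int) :
    (pvFirstMap num_total measured_idx).get? i
      = if 0 ≤ i ∧ i < num_total ∧ i ∈ measured_idx then some ((measured_idx.idxOf i : Int)) else none := by
  unfold pvFirstMap
  rw [pvBuild_get?, pvFind?_enumerate]
  simp only [PySem.Dict.get?_empty]
  by_cases hm : i ∈ measured_idx <;> by_cases hr : 0 ≤ i ∧ i < num_total <;>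
    simp [hm, hr]

theorem pvFirstMap_nodup (num_total : Int) (measured_idx : List Int) :
    (pvFirstMap num_total measured_idx).keys.Nodup := by
  unfold pvFirstMap
  exact pvBuild_nodup _ _ _ PySem.Dict.nodup_keys_empty

theorem pvIndex?_of_mem (xs : List Int) (i : Int) (h : i ∈ xs) :
    PySem.List.index? xs i = some (xs.idxOf i) := by
  obtain ⟨k, hk⟩ := Option.isSome_iff_exists.mp ((PySem.List.index?_isSome_iff xs i).mpr h)
  have hk' := hk
  rw [PySem.List.index?_eq_idxOf?] at hk'
  rw [hk]
  have : xs.idxOf i = k := by rw [List.idxOf_eq_getD_idxOf?, hk']; rfl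
  rw [this]

-- one column of the equivalence: A's gathered character map = B's scatter result
theorem pvSide_eq (num_total : Int) (measured_idx : List Int) (s : String) (d : Char) :
    (PySem.List.pyRange 0 num_total 1).map (pvAChar measured_idx s d)
      = (pvFirstMap num_total measured_idx).items.foldl
          (fun l q => l.set q.1.toNat ((PySem.Str.pyGet? s q.2).getD '?'))
          (List.replicate num_total.toNat d) := by
  have hnd : ((pvFirstMap num_total measured_idx).items.map Prod.fst).Nodup := by
    have h := pvFirstMap_nodup num_total measured_idx
    simpa [PySem.Dict.keys] using h
  have hpos : ∀ q ∈ (pvFirstMap num_total measured_idx).items, 0 ≤ q.1 := by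
    intro q hq
    have hg := PySem.Dict.get?_of_mem_items (pvFirstMap num_total measured_idx) hq
      (pvFirstMap_nodup _ _)
    rw [pvFirstMap_get?] at hg
    split at hg
    · next hc => exact hc.1
    · cases hg
  apply List.ext_getElem?
  intro k
  rw [pvScatter_getElem? _ _ _ hnd hpos k]
  by_cases hk : k < num_total.toNat
  · have hL : ((PySem.List.pyRange 0 num_total 1).map (pvAChar measured_idx s d))[k]?
        = some (pvAChar measured_idx s d (k : Int)) := by
      simp [PySem.List.pyRange_one, hk]
    rw [hL]
    cases hf : (pvFirstMap num_total measured_idx).items.find? (fun q => q.1 == ((k : Nat) : Int)) with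
    | none =>
        have hget : (pvFirstMap num_total measured_idx).get? ((k : Nat) : Int) = none := by
          simp [PySem.Dict.get?, hf]
        rw [pvFirstMap_get?] at hget
        have hmem : ((k : Nat) : Int) ∉ measured_idx := by
          intro hm
          simp [hm, (by omega : ((k : Nat) : Int) < num_total),
                Int.natCast_nonneg k] at hget
        simp [pvAChar, hk]
        exact fun hm => absurd hm hmem
    | some q =>
        have hq1 : q.1 = ((k : Nat) : Int) := by
          have := List.find?_some hf
          simpa using this
        have hget : (pvFirstMap num_total measured_idx).get? ((k : Nat) : Int) = some q.2 := by
          simp [PySem.Dict.get?, hf]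
        rw [pvFirstMap_get?] at hget
        split at hget
        · next hc =>
            have hq2 : q.2 = (measured_idx.idxOf ((k : Nat) : Int) : Int) :=
              (Option.some.injEq _ _ ▸ hget).symm
            have hix : List.idxOf? ((k : Nat) : Int) measured_idx
                = some (measured_idx.idxOf ((k : Nat) : Int)) := by
              rw [← PySem.List.index?_eq_idxOf?]
              exact pvIndex?_of_mem measured_idx _ hc.2.2
            simp only [List.length_replicate, if_pos hk]
            simp [pvAChar, hc.2.2, hix, hq2]
        · cases hget
  · have hL : ((PySem.List.pyRange 0 num_total 1).map (pvAChar measured_idx s d))[k]? = none := by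
      apply List.getElem?_eq_none
      simp [PySem.List.pyRange_one]
      omega
    rw [hL]
    cases hf : (pvFirstMap num_total measured_idx).items.find? (fun q => q.1 == ((k : Nat) : Int)) with
    | none =>
        apply Eq.symm
        apply List.getElem?_eq_none
        simp
        omega
    | some q => simp [List.length_replicate, hk]

-- per measure: A's inner fold equals B's scatter fold
theorem pvItem_eq (num_total : Int) (measured_idx : List Int) (obs out : String) :
    (PySem.List.pyRange 0 num_total 1).foldl (pvAStep measured_idx obs out) ([], [])
      = (pvFirstMap num_total measured_idx).items.foldl
          (fun (st : List Char × List Char) q =>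
            (st.1.set q.1.toNat ((PySem.Str.pyGet? obs q.2).getD '?'),
             st.2.set q.1.toNat ((PySem.Str.pyGet? out q.2).getD '?')))
          (List.replicate num_total.toNat 'Z', List.replicate num_total.toNat '0') := by
  have hsplit := PySem.List.foldl_prod_mk
      (fun (l : List Char) (q : Int × Int) => l.set q.1.toNat ((PySem.Str.pyGet? obs q.2).getD '?'))
      (fun (l : List Char) (q : Int × Int) => l.set q.1.toNat ((PySem.Str.pyGet? out q.2).getD '?'))
      ((pvFirstMap num_total measured_idx).items)
      (List.replicate num_total.toNat 'Z') (List.replicate num_total.toNat '0')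
  rw [pvAInner_eq, pvSide_eq num_total measured_idx obs 'Z',
      pvSide_eq num_total measured_idx out '0']
  exact hsplit.symm

theorem pvMeasure_eq (num_total : Int) (measured_idx : List Int) (item : String × String) :
    pvAMeasure num_total measured_idx item
      = pvBMeasure (pvFirstMap num_total measured_idx) num_total item := by
  unfold pvAMeasure pvBMeasure
  rw [pvItem_eq]

-- ===== VERDICT (by name: the statement is the Claim_ definition above) =====
theorem transpile_measure_operators_spec : Claim_equal_transpile_measure_operators := by
  unfold Claim_equal_transpile_measure_operators
  intro measures num_total measured_idx _ _
  unfold Spec_transpile_measure_operators transpile_measure_operators transpile_measure_operators_alt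
  rw [PySem.List.foldl_append_singleton_eq_map (pvAMeasure num_total measured_idx)]
  simp [pvMeasure_eq]
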